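-- pv_equiv track=rewrite | github.com/CultureBotAI/MicroGrowLinkService | scripts/build_isolation_source_hierarchy.py | create_themes
-- ===== SOURCE A (Python) =====
-- def create_themes(sources):
--     """
--     Create themed hierarchy based on source names.
--
--     Themes:
--     - Host-Associated
--     - Environmental
--     - Medical/Clinical
--     - Laboratory/Engineered
--     - Food/Agriculture
--     - Other
--     """
--
--     themes = {
--         "Host-Associated": [],
--         "Environmental": [],
--         "Medical/Clinical": [],
--         "Laboratory/Engineered": [],
--         "Food/Agriculture": [],
--         "Other": []
--     }
--
--     # Keywords for categorization
--     host_keywords = [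
--         'host', 'human', 'patient', 'mammals', 'animal', 'dog', 'cat', 'mouse',
--         'rat', 'bird', 'fish', 'insect', 'worm', 'cattle', 'pig', 'sheep',
--         'body', 'organ', 'tissue', 'blood', 'feces', 'urine', 'sputum',
--         'gastrointestinal', 'intestine', 'oral', 'mouth', 'skin', 'nail',
--         'respiratory', 'digestive', 'urinary', 'reproductive'
--     ]
--
--     environmental_keywords = [
--         'environmental', 'aquatic', 'marine', 'freshwater', 'terrestrial',
--         'soil', 'sediment', 'water', 'ocean', 'sea', 'lake', 'river',
--         'forest', 'desert', 'tundra', 'arctic', 'tropical',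
--         'wetland', 'mangrove', 'estuary', 'coastal', 'beach', 'tidal',
--         'rock', 'mineral', 'geothermal', 'hydrothermal', 'volcanic',
--         'air', 'atmosphere', 'aerosol'
--     ]
--
--     medical_keywords = [
--         'infection', 'disease', 'clinic', 'hospital', 'medical',
--         'patient', 'wound', 'abscess', 'inflammation', 'sepsis',
--         'pneumonia', 'meningitis', 'endocarditis', 'bacteremia',
--         'pathogen', 'nosocomial', 'cystic-fibrosis'
--     ]
--
--     lab_keywords = [
--         'laboratory', 'engineered', 'culture', 'bioreactor',
--         'fermentation', 'industrial', 'biotechnology'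
--     ]
--
--     food_keywords = [
--         'food', 'dairy', 'milk', 'cheese', 'yogurt', 'meat',
--         'vegetable', 'fruit', 'grain', 'fermented', 'beverage',
--         'wine', 'beer', 'bread', 'agricultural', 'farm', 'crop',
--         'plant', 'leaf', 'root', 'seed', 'compost'
--     ]
--
--     for source_id, name in sources.items():
--         # Extract value part (after 'isolation_source:')
--         value = source_id.replace('isolation_source:', '')
--         name_lower = name.lower()
--         value_lower = value.lower()
--
--         # Check which theme matches
--         categorized = False
--
--         # Check host-associated
--         if any(kw in name_lower or kw in value_lower for kw in host_keywords):
--             themes["Host-Associated"].append({"id": source_id, "value": value, "label": name})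
--             categorized = True
--         # Check medical
--         elif any(kw in name_lower or kw in value_lower for kw in medical_keywords):
--             themes["Medical/Clinical"].append({"id": source_id, "value": value, "label": name})
--             categorized = True
--         # Check environmental
--         elif any(kw in name_lower or kw in value_lower for kw in environmental_keywords):
--             themes["Environmental"].append({"id": source_id, "value": value, "label": name})
--             categorized = True
--         # Check food
--         elif any(kw in name_lower or kw in value_lower for kw in food_keywords):
--             themes["Food/Agriculture"].append({"id": source_id, "value": value, "label": name})
--             categorized = True
--         # Check lab
--         elif any(kw in name_lower or kw in value_lower for kw in lab_keywords):
--             themes["Laboratory/Engineered"].append({"id": source_id, "value": value, "label": name})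
--             categorized = True
--
--         # If not categorized, add to Other
--         if not categorized:
--             themes["Other"].append({"id": source_id, "value": value, "label": name})
--
--     # Sort each theme by label
--     for theme in themes:
--         themes[theme] = sorted(themes[theme], key=lambda x: x['label'])
--
--     return themes
-- ===== SOURCE B (Python) =====
-- # B: theme-major traversal. Instead of classifying each source through a
-- # five-way elif chain, B makes one pass per theme over a shrinking pool,
-- # peeling off the sources that match that theme's keywords; whatever is left
-- # after all five passes is "Other". Correct because each source's category
-- # depends only on itself, so the traversal order does not matter.
--
-- _RULES = [
--     ("Host-Associated", [
--         'host', 'human', 'patient', 'mammals', 'animal', 'dog', 'cat', 'mouse',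
--         'rat', 'bird', 'fish', 'insect', 'worm', 'cattle', 'pig', 'sheep',
--         'body', 'organ', 'tissue', 'blood', 'feces', 'urine', 'sputum',
--         'gastrointestinal', 'intestine', 'oral', 'mouth', 'skin', 'nail',
--         'respiratory', 'digestive', 'urinary', 'reproductive'
--     ]),
--     ("Medical/Clinical", [
--         'infection', 'disease', 'clinic', 'hospital', 'medical',
--         'patient', 'wound', 'abscess', 'inflammation', 'sepsis',
--         'pneumonia', 'meningitis', 'endocarditis', 'bacteremia',
--         'pathogen', 'nosocomial', 'cystic-fibrosis'
--     ]),
--     ("Environmental", [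
--         'environmental', 'aquatic', 'marine', 'freshwater', 'terrestrial',
--         'soil', 'sediment', 'water', 'ocean', 'sea', 'lake', 'river',
--         'forest', 'desert', 'tundra', 'arctic', 'tropical',
--         'wetland', 'mangrove', 'estuary', 'coastal', 'beach', 'tidal',
--         'rock', 'mineral', 'geothermal', 'hydrothermal', 'volcanic',
--         'air', 'atmosphere', 'aerosol'
--     ]),
--     ("Food/Agriculture", [
--         'food', 'dairy', 'milk', 'cheese', 'yogurt', 'meat',
--         'vegetable', 'fruit', 'grain', 'fermented', 'beverage',
--         'wine', 'beer', 'bread', 'agricultural', 'farm', 'crop',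
--         'plant', 'leaf', 'root', 'seed', 'compost'
--     ]),
--     ("Laboratory/Engineered", [
--         'laboratory', 'engineered', 'culture', 'bioreactor',
--         'fermentation', 'industrial', 'biotechnology'
--     ]),
-- ]
--
-- _ORDER = ["Host-Associated", "Environmental", "Medical/Clinical",
--           "Laboratory/Engineered", "Food/Agriculture", "Other"]
--
--
-- def _hits(kws, e):
--     # e = (source_id, value, name, name_lower, value_lower)
--     return any(kw in e[3] or kw in e[4] for kw in kws)
--
--
-- def create_themes(sources):
--     pool = [(sid, sid.replace('isolation_source:', ''), nm,
--              nm.lower(), sid.replace('isolation_source:', '').lower())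
--             for sid, nm in sources.items()]
--     buckets = {}
--     for theme, kws in _RULES:     # priority order: host, medical, env, food, lab
--         buckets[theme] = [e for e in pool if _hits(kws, e)]
--         pool = [e for e in pool if not _hits(kws, e)]
--     buckets["Other"] = pool
--     return {t: sorted(({"id": s, "value": v, "label": n}
--                        for s, v, n, _, _ in buckets[t]),
--                       key=lambda d: d["label"])
--             for t in _ORDER}
-- ===== Notes on version B (the rewrite author's own statement) =====
-- stated objective: alternative
-- what changed: B inverts the loop nesting: instead of A's per-source five-way elif classification into dict buckets, B makes one pass per theme over a shrinking pool of precomputed tuples, peeling off that theme's matches by filtering, with the final leftover becoming Other; equal because each source's category depends only on itself.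
import Mathlib
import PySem

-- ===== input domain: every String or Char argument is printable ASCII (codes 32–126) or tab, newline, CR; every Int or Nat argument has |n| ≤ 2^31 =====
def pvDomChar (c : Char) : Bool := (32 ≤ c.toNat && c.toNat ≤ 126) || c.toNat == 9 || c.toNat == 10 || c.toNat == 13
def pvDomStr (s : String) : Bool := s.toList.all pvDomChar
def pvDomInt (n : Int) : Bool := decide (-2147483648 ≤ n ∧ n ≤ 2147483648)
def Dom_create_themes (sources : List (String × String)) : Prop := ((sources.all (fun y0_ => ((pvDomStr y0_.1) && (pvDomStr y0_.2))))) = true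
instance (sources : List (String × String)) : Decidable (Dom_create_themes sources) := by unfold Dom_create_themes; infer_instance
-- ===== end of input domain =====

-- B inverts the loop nesting: one filtering pass per theme over a shrinking pool
-- instead of A's per-source elif classification (objective: alternative).

-- ===== PORT A =====
def hostKeywords : List String :=
  ["host", "human", "patient", "mammals", "animal", "dog", "cat", "mouse",
   "rat", "bird", "fish", "insect", "worm", "cattle", "pig", "sheep",
   "body", "organ", "tissue", "blood", "feces", "urine", "sputum",
   "gastrointestinal", "intestine", "oral", "mouth", "skin", "nail",
   "respiratory", "digestive", "urinary", "reproductive"]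

def environmentalKeywords : List String :=
  ["environmental", "aquatic", "marine", "freshwater", "terrestrial",
   "soil", "sediment", "water", "ocean", "sea", "lake", "river",
   "forest", "desert", "tundra", "arctic", "tropical",
   "wetland", "mangrove", "estuary", "coastal", "beach", "tidal",
   "rock", "mineral", "geothermal", "hydrothermal", "volcanic",
   "air", "atmosphere", "aerosol"]

def medicalKeywords : List String :=
  ["infection", "disease", "clinic", "hospital", "medical",
   "patient", "wound", "abscess", "inflammation", "sepsis",
   "pneumonia", "meningitis", "endocarditis", "bacteremia",
   "pathogen", "nosocomial", "cystic-fibrosis"]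

def labKeywords : List String :=
  ["laboratory", "engineered", "culture", "bioreactor",
   "fermentation", "industrial", "biotechnology"]

def foodKeywords : List String :=
  ["food", "dairy", "milk", "cheese", "yogurt", "meat",
   "vegetable", "fruit", "grain", "fermented", "beverage",
   "wine", "beer", "bread", "agricultural", "farm", "crop",
   "plant", "leaf", "root", "seed", "compost"]

-- any(kw in name_lower or kw in value_lower for kw in kws)
def kwAny (kws : List String) (nl vl : String) : Bool :=
  kws.any (fun kw => PySem.Str.isIn kw nl || PySem.Str.isIn kw vl)

-- the loop body of A: one elif chain, appending the entry dict to the matching theme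
def aStep (themes : PySem.Dict String (List (List (String × String))))
    (p : String × String) : PySem.Dict String (List (List (String × String))) :=
  let sid := p.1
  let name := p.2
  let value := PySem.Str.replace sid "isolation_source:" ""
  let nl := PySem.Str.lower name
  let vl := PySem.Str.lower value
  let entry : List (String × String) := [("id", sid), ("value", value), ("label", name)]
  if kwAny hostKeywords nl vl then themes.modify "Host-Associated" [] (· ++ [entry])
  else if kwAny medicalKeywords nl vl then themes.modify "Medical/Clinical" [] (· ++ [entry])
  else if kwAny environmentalKeywords nl vl then themes.modify "Environmental" [] (· ++ [entry])
  else if kwAny foodKeywords nl vl then themes.modify "Food/Agriculture" [] (· ++ [entry])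
  else if kwAny labKeywords nl vl then themes.modify "Laboratory/Engineered" [] (· ++ [entry])
  else themes.modify "Other" [] (· ++ [entry])

def create_themes (sources : List (String × String)) : List (String × List (List (String × String))) :=
  let themes0 : PySem.Dict String (List (List (String × String))) :=
    PySem.Dict.mk
      [("Host-Associated", []), ("Environmental", []), ("Medical/Clinical", []),
       ("Laboratory/Engineered", []), ("Food/Agriculture", []), ("Other", [])]
  let filled := sources.foldl aStep themes0
  -- for theme in themes: themes[theme] = sorted(themes[theme], key=lambda x: x['label'])
  -- (rewrites each value in place, key order unchanged; the dict is the returned assoc list)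
  filled.items.map (fun kv =>
    (kv.1, PySem.List.sorted kv.2 (fun e => (PySem.Dict.mk e).getD "label" "") false))

-- ===== PORT B =====
def pvRules : List (String × List String) :=
  [("Host-Associated",
    ["host", "human", "patient", "mammals", "animal", "dog", "cat", "mouse",
     "rat", "bird", "fish", "insect", "worm", "cattle", "pig", "sheep",
     "body", "organ", "tissue", "blood", "feces", "urine", "sputum",
     "gastrointestinal", "intestine", "oral", "mouth", "skin", "nail",
     "respiratory", "digestive", "urinary", "reproductive"]),
   ("Medical/Clinical",
    ["infection", "disease", "clinic", "hospital", "medical",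
     "patient", "wound", "abscess", "inflammation", "sepsis",
     "pneumonia", "meningitis", "endocarditis", "bacteremia",
     "pathogen", "nosocomial", "cystic-fibrosis"]),
   ("Environmental",
    ["environmental", "aquatic", "marine", "freshwater", "terrestrial",
     "soil", "sediment", "water", "ocean", "sea", "lake", "river",
     "forest", "desert", "tundra", "arctic", "tropical",
     "wetland", "mangrove", "estuary", "coastal", "beach", "tidal",
     "rock", "mineral", "geothermal", "hydrothermal", "volcanic",
     "air", "atmosphere", "aerosol"]),
   ("Food/Agriculture",
    ["food", "dairy", "milk", "cheese", "yogurt", "meat",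
     "vegetable", "fruit", "grain", "fermented", "beverage",
     "wine", "beer", "bread", "agricultural", "farm", "crop",
     "plant", "leaf", "root", "seed", "compost"]),
   ("Laboratory/Engineered",
    ["laboratory", "engineered", "culture", "bioreactor",
     "fermentation", "industrial", "biotechnology"])]

def pvThemeOrder : List String :=
  ["Host-Associated", "Environmental", "Medical/Clinical",
   "Laboratory/Engineered", "Food/Agriculture", "Other"]

-- _hits(kws, e): e = (source_id, value, name, name_lower, value_lower)
def bHits (kws : List String) (e : String × String × String × String × String) : Bool :=
  kws.any (fun kw => PySem.Str.isIn kw e.2.2.2.1 || PySem.Str.isIn kw e.2.2.2.2)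

def create_themes_alt (sources : List (String × String)) : List (String × List (List (String × String))) :=
  -- pool comprehension
  let pool0 := sources.map (fun p =>
    (p.1, PySem.Str.replace p.1 "isolation_source:" "", p.2,
     PySem.Str.lower p.2, PySem.Str.lower (PySem.Str.replace p.1 "isolation_source:" "")))
  -- for theme, kws in _RULES: peel off this theme's matches, shrink the pool
  let st := pvRules.foldl (fun st (r : String × List String) =>
      (st.1.insert r.1 (st.2.filter (fun e => bHits r.2 e)),
       st.2.filter (fun e => !bHits r.2 e)))
    ((PySem.Dict.empty : PySem.Dict String (List (String × String × String × String × String))), pool0)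
  let buckets := st.1.insert "Other" st.2
  -- final dict comprehension over _ORDER, sorting each bucket's entry dicts by label
  pvThemeOrder.map (fun t =>
    (t, PySem.List.sorted
          ((buckets.getD t []).map (fun e => [("id", e.1), ("value", e.2.1), ("label", e.2.2.1)]))
          (fun d => (PySem.Dict.mk d).getD "label" "") false))

-- ===== PRECONDITION & SPEC =====
def Spec_create_themes (sources : List (String × String)) (out : List (String × List (List (String × String)))) : Prop := out = create_themes_alt sources
instance (sources : List (String × String)) (out : List (String × List (List (String × String)))) : Decidable (Spec_create_themes sources out) := by unfold Spec_create_themes; infer_instance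

-- ===== CLAIM =====
def Claim_equal_create_themes : Prop := ∀ (sources : List (String × String)), Dom_create_themes sources → Spec_create_themes sources (create_themes sources)

-- ===== LEMMAS AND PROOFS =====

-- proof-side names for the per-source data both programs compute
def nlOf (p : String × String) : String := PySem.Str.lower p.2
def vlOf (p : String × String) : String :=
  PySem.Str.lower (PySem.Str.replace p.1 "isolation_source:" "")
def entryOf (p : String × String) : List (String × String) :=
  [("id", p.1), ("value", PySem.Str.replace p.1 "isolation_source:" ""), ("label", p.2)]
def tupleOf (p : String × String) : String × String × String × String × String :=
  (p.1, PySem.Str.replace p.1 "isolation_source:" "", p.2, nlOf p, vlOf p)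

-- the theme A's elif chain assigns to p
def classifyTheme (p : String × String) : String :=
  if kwAny hostKeywords (nlOf p) (vlOf p) then "Host-Associated"
  else if kwAny medicalKeywords (nlOf p) (vlOf p) then "Medical/Clinical"
  else if kwAny environmentalKeywords (nlOf p) (vlOf p) then "Environmental"
  else if kwAny foodKeywords (nlOf p) (vlOf p) then "Food/Agriculture"
  else if kwAny labKeywords (nlOf p) (vlOf p) then "Laboratory/Engineered"
  else "Other"

-- A's step appends the entry at the theme the chain picks
theorem aStep_eq (d : PySem.Dict String (List (List (String × String)))) (p : String × String) :
    aStep d p = d.modify (classifyTheme p) [] (· ++ [entryOf p]) := by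
  simp only [aStep, classifyTheme, entryOf, nlOf, vlOf]
  split_ifs <;> rfl

-- A's fold is the canonical grouping fold over the classified sources
theorem fold_eq (sources : List (String × String))
    (d : PySem.Dict String (List (List (String × String)))) :
    sources.foldl aStep d =
      (sources.map (fun p => (classifyTheme p, entryOf p))).foldl
        (fun d q => d.modify q.1 [] (· ++ [q.2])) d := by
  induction sources generalizing d with
  | nil => rfl
  | cons p rest ih => rw [List.foldl_cons, List.map_cons, List.foldl_cons, aStep_eq]; exact ih _

-- the chain's theme is always one of the six keys
theorem classifyTheme_mem (p : String × String) : classifyTheme p ∈ pvThemeOrder := by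
  unfold classifyTheme
  split_ifs <;> simp [pvThemeOrder]


-- per-rule match tests over the raw source pair
def selHost (p : String × String) : Bool := kwAny hostKeywords (nlOf p) (vlOf p)
def selMed (p : String × String) : Bool := kwAny medicalKeywords (nlOf p) (vlOf p)
def selEnv (p : String × String) : Bool := kwAny environmentalKeywords (nlOf p) (vlOf p)
def selFood (p : String × String) : Bool := kwAny foodKeywords (nlOf p) (vlOf p)
def selLab (p : String × String) : Bool := kwAny labKeywords (nlOf p) (vlOf p)

def sortE (l : List (List (String × String))) : List (List (String × String)) :=
  PySem.List.sorted l (fun e => (PySem.Dict.mk e).getD "label" "") false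

-- the elif chain's verdict, theme by theme, as a boolean of the five tests
theorem class_host (p : String × String) :
    (classifyTheme p == "Host-Associated") = selHost p := by
  simp only [classifyTheme, selHost]
  cases h1 : kwAny hostKeywords (nlOf p) (vlOf p) <;>
  cases h2 : kwAny medicalKeywords (nlOf p) (vlOf p) <;>
  cases h3 : kwAny environmentalKeywords (nlOf p) (vlOf p) <;>
  cases h4 : kwAny foodKeywords (nlOf p) (vlOf p) <;>
  cases h5 : kwAny labKeywords (nlOf p) (vlOf p) <;> rfl

theorem class_med (p : String × String) :
    (classifyTheme p == "Medical/Clinical") = (selMed p && !selHost p) := by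
  simp only [classifyTheme, selHost, selMed]
  cases h1 : kwAny hostKeywords (nlOf p) (vlOf p) <;>
  cases h2 : kwAny medicalKeywords (nlOf p) (vlOf p) <;>
  cases h3 : kwAny environmentalKeywords (nlOf p) (vlOf p) <;>
  cases h4 : kwAny foodKeywords (nlOf p) (vlOf p) <;>
  cases h5 : kwAny labKeywords (nlOf p) (vlOf p) <;> rfl

theorem class_env (p : String × String) :
    (classifyTheme p == "Environmental") = (selEnv p && (!selMed p && !selHost p)) := by
  simp only [classifyTheme, selHost, selMed, selEnv]
  cases h1 : kwAny hostKeywords (nlOf p) (vlOf p) <;>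
  cases h2 : kwAny medicalKeywords (nlOf p) (vlOf p) <;>
  cases h3 : kwAny environmentalKeywords (nlOf p) (vlOf p) <;>
  cases h4 : kwAny foodKeywords (nlOf p) (vlOf p) <;>
  cases h5 : kwAny labKeywords (nlOf p) (vlOf p) <;> rfl

theorem class_food (p : String × String) :
    (classifyTheme p == "Food/Agriculture") = (selFood p && (!selEnv p && (!selMed p && !selHost p))) := by
  simp only [classifyTheme, selHost, selMed, selEnv, selFood]
  cases h1 : kwAny hostKeywords (nlOf p) (vlOf p) <;>
  cases h2 : kwAny medicalKeywords (nlOf p) (vlOf p) <;>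
  cases h3 : kwAny environmentalKeywords (nlOf p) (vlOf p) <;>
  cases h4 : kwAny foodKeywords (nlOf p) (vlOf p) <;>
  cases h5 : kwAny labKeywords (nlOf p) (vlOf p) <;> rfl

theorem class_lab (p : String × String) :
    (classifyTheme p == "Laboratory/Engineered") = (selLab p && (!selFood p && (!selEnv p && (!selMed p && !selHost p)))) := by
  simp only [classifyTheme, selHost, selMed, selEnv, selFood, selLab]
  cases h1 : kwAny hostKeywords (nlOf p) (vlOf p) <;>
  cases h2 : kwAny medicalKeywords (nlOf p) (vlOf p) <;>
  cases h3 : kwAny environmentalKeywords (nlOf p) (vlOf p) <;>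
  cases h4 : kwAny foodKeywords (nlOf p) (vlOf p) <;>
  cases h5 : kwAny labKeywords (nlOf p) (vlOf p) <;> rfl

theorem class_other (p : String × String) :
    (classifyTheme p == "Other") = (!selLab p && (!selFood p && (!selEnv p && (!selMed p && !selHost p)))) := by
  simp only [classifyTheme, selHost, selMed, selEnv, selFood, selLab]
  cases h1 : kwAny hostKeywords (nlOf p) (vlOf p) <;>
  cases h2 : kwAny medicalKeywords (nlOf p) (vlOf p) <;>
  cases h3 : kwAny environmentalKeywords (nlOf p) (vlOf p) <;>
  cases h4 : kwAny foodKeywords (nlOf p) (vlOf p) <;>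
  cases h5 : kwAny labKeywords (nlOf p) (vlOf p) <;> rfl

-- A in normal form: six label-sorted buckets, bucket t = the sources the chain sends to t
theorem a_norm (sources : List (String × String)) :
    create_themes sources =
      pvThemeOrder.map (fun t =>
        (t, sortE ((sources.filter (fun p => classifyTheme p == t)).map entryOf))) := by
  simp only [create_themes]
  rw [fold_eq]
  set tags := sources.map (fun p => (classifyTheme p, entryOf p)) with htags
  set d0 : PySem.Dict String (List (List (String × String))) :=
    PySem.Dict.mk
      [("Host-Associated", []), ("Environmental", []), ("Medical/Clinical", []),
       ("Laboratory/Engineered", []), ("Food/Agriculture", []), ("Other", [])] with hd0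
  have hkeys : (tags.foldl (fun d q => d.modify q.1 [] (· ++ [q.2])) d0).keys = pvThemeOrder := by
    have h := PySem.Dict.keys_foldl_modify_key tags (fun q => q.1) []
      (fun _ q v => v ++ [q.2]) d0
    rw [h, PySem.Set.update_eq_append_filter]
    have hnil : ((PySem.Set.ofList (tags.map (fun q => q.1))).filter
        (fun y => !(PySem.Set.contains d0.keys y))) = [] := by
      rw [List.filter_eq_nil_iff]
      intro y hy
      rw [PySem.Set.mem_ofList] at hy
      have hy' : y ∈ tags.map (fun q => q.1) := hy
      rcases List.mem_map.mp hy' with ⟨te, hte, rfl⟩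
      rw [htags] at hte
      rcases List.mem_map.mp hte with ⟨p, _, rfl⟩
      have hm := classifyTheme_mem p
      simp only [pvThemeOrder, List.mem_cons, List.not_mem_nil, or_false] at hm
      rcases hm with h'|h'|h'|h'|h'|h' <;>
        simp [h', PySem.Set.contains, hd0, PySem.Dict.keys]
    rw [hnil, List.append_nil, hd0]
    simp [PySem.Dict.keys, pvThemeOrder]
  have hnodup : (tags.foldl (fun d q => d.modify q.1 [] (· ++ [q.2])) d0).keys.Nodup := by
    rw [hkeys]; unfold pvThemeOrder; simp
  rw [PySem.Dict.items_eq_map_keys _ hnodup [], hkeys, List.map_map]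
  simp only [pvThemeOrder, List.map_cons, List.map_nil, Function.comp_def,
    PySem.Dict.getD_foldl_modify_append, htags, List.filter_map, List.map_map]
  simp [hd0, PySem.Dict.getD, PySem.Dict.get?, sortE]

set_option maxHeartbeats 4000000 in
-- B in normal form: the same six buckets, written with the pool-peeling tests
theorem b_norm (sources : List (String × String)) :
    create_themes_alt sources =
      [("Host-Associated", sortE ((sources.filter (fun p => selHost p)).map entryOf)),
       ("Environmental", sortE ((sources.filter (fun p => selEnv p && (!selMed p && !selHost p))).map entryOf)),
       ("Medical/Clinical", sortE ((sources.filter (fun p => selMed p && !selHost p)).map entryOf)),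
       ("Laboratory/Engineered", sortE ((sources.filter (fun p => selLab p && (!selFood p && (!selEnv p && (!selMed p && !selHost p))))).map entryOf)),
       ("Food/Agriculture", sortE ((sources.filter (fun p => selFood p && (!selEnv p && (!selMed p && !selHost p)))).map entryOf)),
       ("Other", sortE ((sources.filter (fun p => !selLab p && (!selFood p && (!selEnv p && (!selMed p && !selHost p))))).map entryOf))] := by
  simp only [create_themes_alt, pvRules, List.foldl_cons, List.foldl_nil, pvThemeOrder,
    List.map_cons, List.map_nil, PySem.Dict.getD_insert, PySem.Dict.getD_empty,
    List.filter_filter, List.filter_map, List.map_map, String.reduceEq, reduceIte]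
  rfl

-- ===== VERDICT =====
set_option maxHeartbeats 1000000 in
theorem create_themes_spec : Claim_equal_create_themes := by
  intro sources _
  show create_themes sources = create_themes_alt sources
  rw [a_norm, b_norm]
  simp only [pvThemeOrder, List.map_cons, List.map_nil]
  rw [List.filter_congr (fun p _ => class_host p),
      List.filter_congr (fun p _ => class_env p),
      List.filter_congr (fun p _ => class_med p),
      List.filter_congr (fun p _ => class_lab p),
      List.filter_congr (fun p _ => class_food p),
      List.filter_congr (fun p _ => class_other p)]
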